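-- pv_equiv track=rewrite | github.com/Fortunoxx/AdventOfCode2021 | src/day17.py | calcFirstValidTargetX
-- ===== SOURCE A (Python) =====
-- def calcFirstValidTargetX(coordinates):
--     xmin = coordinates[0][0]
--     xmax = coordinates[1][0]
--     i = 0
--     x = 0
--     while not (x >= xmin and x <= xmax):
--         x = 0
--         i += 1
--         for j in range(i):
--             x += j
--     # x is the spot where we will hit the target
--     # i is the first x-velocity when this can happen
--     # -1 because zero-based
--     return (x, i-1)
-- ===== SOURCE B (Python) =====
-- def calcFirstValidTargetX(coordinates):
--     xmin = coordinates[0][0]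
--     # binary search the smallest i whose sum 0+1+...+(i-1) = i*(i-1)//2 reaches xmin;
--     # since partial sums are increasing, that i is A's exit step whenever A terminates
--     lo = 0
--     hi = max(xmin, 0) + 1
--     while lo < hi:
--         mid = (lo + hi) // 2
--         if mid * (mid - 1) // 2 >= xmin:
--             hi = mid
--         else:
--             lo = mid + 1
--     return (lo * (lo - 1) // 2, lo - 1)
-- ===== Notes on version B (the rewrite author's own statement) =====
-- stated objective: alternative
-- what changed: B replaces A's step-by-step scan, which rebuilds the triangular sum from scratch with an inner loop at every step, by a binary search over step counts for the smallest i with i*(i-1)//2 >= xmin, exploiting that the partial sums are increasing.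
import Mathlib
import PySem

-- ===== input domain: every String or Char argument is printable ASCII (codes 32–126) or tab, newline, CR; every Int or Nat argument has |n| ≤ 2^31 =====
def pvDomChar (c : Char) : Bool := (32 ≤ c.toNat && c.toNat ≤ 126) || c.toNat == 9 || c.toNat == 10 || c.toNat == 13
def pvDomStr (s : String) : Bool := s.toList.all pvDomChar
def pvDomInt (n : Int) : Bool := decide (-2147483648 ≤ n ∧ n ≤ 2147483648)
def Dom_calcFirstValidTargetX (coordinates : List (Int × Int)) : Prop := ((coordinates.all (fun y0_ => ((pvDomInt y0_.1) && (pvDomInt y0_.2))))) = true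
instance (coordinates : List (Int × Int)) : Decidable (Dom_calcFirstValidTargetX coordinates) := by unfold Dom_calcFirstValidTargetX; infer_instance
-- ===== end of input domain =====

-- B replaces A's step-by-step scan, which rebuilds each triangular sum with an inner loop,
-- by a binary search for the smallest step count whose sum reaches xmin; return value only.

-- ===== PORT A =====
-- A's while loop, with fuel: on every input admitted by Dom ∧ Pre_ the loop provably exits
-- within 70000 iterations (proved below from the 2^31 domain bound); on fuel exhaustion
-- (A diverges there, outside Pre_) it returns the current state.
def pvLoopA (xmin xmax : Int) : Nat → Int → Int → Int × Int
  | 0, i, x => (x, i - 1)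
  | Nat.succ fuel, i, x =>
    if xmin ≤ x ∧ x ≤ xmax then (x, i - 1)
    else pvLoopA xmin xmax fuel (i + 1)
      ((PySem.List.pyRange 0 (i + 1) 1).foldl (fun a j => a + j) 0)

def calcFirstValidTargetX (coordinates : List (Int × Int)) : Int × Int :=
  match PySem.List.pyGet? coordinates 0, PySem.List.pyGet? coordinates 1 with
  | some c0, some c1 => pvLoopA c0.1 c1.1 70000 0 0
  | _, _ => (0, 0)   -- IndexError in Python: outside Pre_

-- ===== PORT B =====
-- i*(i-1)//2, the sum 0+1+...+(i-1), as Source B writes it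
def pvG (i : Int) : Int := PySem.Int.floordiv (i * (i - 1)) 2

lemma pvSearchB_mid (lo hi : Int) (h : lo < hi) :
    lo ≤ PySem.Int.floordiv (lo + hi) 2 ∧ PySem.Int.floordiv (lo + hi) 2 < hi := by
  rcases PySem.Int.floordiv_two_mid_bounds (le_of_lt h) with ⟨h1, h2⟩
  refine ⟨h1, ?_⟩
  rw [PySem.Int.floordiv_lt_iff_lt_mul (by norm_num)]
  omega

-- Source B's while loop: lo/hi shrink by binary search
def pvSearchB (xmin lo hi : Int) : Int :=
  if h : lo < hi then
    let mid := PySem.Int.floordiv (lo + hi) 2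
    if xmin ≤ pvG mid then pvSearchB xmin lo mid
    else pvSearchB xmin (mid + 1) hi
  else lo
termination_by (hi - lo).toNat
decreasing_by
  · have := pvSearchB_mid lo hi h; omega
  · have := pvSearchB_mid lo hi h; omega

def calcFirstValidTargetX_alt (coordinates : List (Int × Int)) : Int × Int :=
  match PySem.List.pyGet? coordinates 0 with
  | none => (0, 0)   -- IndexError in Python: outside Pre_
  | some c0 =>
    let xmin := c0.1
    let lo := pvSearchB xmin 0 (max xmin 0 + 1)
    (pvG lo, lo - 1)

-- ===== PRECONDITION & SPEC =====
-- triangular number k*(k+1)/2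
def pvT (k : Nat) : Nat := k * (k + 1) / 2

-- integer square root by bisection (kernel-evaluable; fuel is only an upper bound
-- on the number of halvings, the recursion stops at hi ≤ lo + 1)
def pvSqrtGo (m : Nat) : Nat → Nat → Nat → Nat
  | 0, lo, _ => lo
  | Nat.succ f, lo, hi =>
    if hi ≤ lo + 1 then lo
    else if (lo + hi) / 2 * ((lo + hi) / 2) ≤ m then pvSqrtGo m f ((lo + hi) / 2) hi
    else pvSqrtGo m f lo ((lo + hi) / 2)

def pvSqrt (m : Nat) : Nat := pvSqrtGo m (m + 1) 0 (m + 1)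

-- smallest k with m ≤ pvT k, in closed form via the integer square root (proved below)
def pvKminAux (m c : Nat) : Nat :=
  if m ≤ (c - 1) * c / 2 then c - 1 else if m ≤ c * (c + 1) / 2 then c else c + 1

def pvKminN (m : Nat) : Nat := pvKminAux m (pvSqrt (2 * m))

-- smallest k with xmin ≤ pvT k
def pvKmin (xmin : Int) : Nat := pvKminN xmin.toNat

-- Pre_ excludes exactly the inputs where Python A does not return: lists of length < 2
-- (IndexError) and inputs with no triangular number in [xmin, xmax] (the while loop never
-- exits); pvT (pvKmin xmin) is the smallest triangular number ≥ xmin.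
def Pre_calcFirstValidTargetX (coordinates : List (Int × Int)) : Prop :=
  2 ≤ coordinates.length ∧
  ((pvT (pvKmin (coordinates.headI).1) : Int) ≤ (coordinates.getD 1 (0, 0)).1)
instance (coordinates : List (Int × Int)) : Decidable (Pre_calcFirstValidTargetX coordinates) := by
  unfold Pre_calcFirstValidTargetX; infer_instance

def pvWitness_calcFirstValidTargetX : (List (Int × Int)) := [(20, -10), (30, -5)]

def Spec_calcFirstValidTargetX (coordinates : List (Int × Int)) (out : Int × Int) : Prop := out = calcFirstValidTargetX_alt coordinates
instance (coordinates : List (Int × Int)) (out : Int × Int) : Decidable (Spec_calcFirstValidTargetX coordinates out) := by unfold Spec_calcFirstValidTargetX; infer_instance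

-- ===== CLAIM (what is proved, stated in full; the proofs are below) =====
def Claim_equal_calcFirstValidTargetX : Prop := ∀ (coordinates : List (Int × Int)), Dom_calcFirstValidTargetX coordinates → Pre_calcFirstValidTargetX coordinates → Spec_calcFirstValidTargetX coordinates (calcFirstValidTargetX coordinates)

-- ===== LEMMAS AND PROOFS =====

lemma two_pvT (k : Nat) : 2 * pvT k = k * (k + 1) := by
  obtain ⟨t, ht⟩ := Nat.even_mul_succ_self k
  unfold pvT; omega

lemma pvT_mono {j k : Nat} (h : j ≤ k) : pvT j ≤ pvT k := by
  have := Nat.mul_le_mul h (Nat.succ_le_succ h)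
  unfold pvT; exact Nat.div_le_div_right this

lemma pvG_zero : pvG 0 = 0 := by decide

lemma pvG_cast (k : Nat) : pvG ((k : Int) + 1) = (pvT k : Int) := by
  unfold pvG
  have h : ((k : Int) + 1) * ((k : Int) + 1 - 1) = (((k + 1) * k : Nat) : Int) := by
    push_cast; ring
  rw [h]
  have h2 : PySem.Int.floordiv (((k + 1) * k : Nat) : Int) 2 = (((k + 1) * k / 2 : Nat) : Int) := by
    exact_mod_cast PySem.Int.floordiv_natCast ((k + 1) * k) 2
  rw [h2]
  norm_cast
  unfold pvT
  rw [Nat.mul_comm]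

lemma pvG_mono {a b : Int} (ha : 0 ≤ a) (hab : a ≤ b) : pvG a ≤ pvG b := by
  unfold pvG
  rw [PySem.Int.floordiv_eq_ediv_of_pos (by norm_num),
      PySem.Int.floordiv_eq_ediv_of_pos (by norm_num)]
  apply Int.ediv_le_ediv (by norm_num)
  by_cases h1 : 1 ≤ a + b
  · nlinarith
  · have h0 : a = 0 ∧ b = 0 := by omega
    simp [h0.1, h0.2]

lemma pvT_shift (c : Nat) : pvT (c - 1) = (c - 1) * c / 2 := by
  unfold pvT
  congr 1
  cases c with
  | zero => rfl
  | succ n => simp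

lemma pvSqrtGo_spec (m : Nat) :
    ∀ (f : Nat) (lo hi : Nat), lo * lo ≤ m → m < hi * hi → hi ≤ lo + 2 ^ f →
      pvSqrtGo m f lo hi * pvSqrtGo m f lo hi ≤ m ∧
        m < (pvSqrtGo m f lo hi + 1) * (pvSqrtGo m f lo hi + 1) := by
  intro f
  induction f with
  | zero =>
    intro lo hi hlo hhi hf
    have h1 : hi ≤ lo + 1 := by simpa using hf
    have h2 : hi * hi ≤ (lo + 1) * (lo + 1) := Nat.mul_le_mul h1 h1
    exact ⟨hlo, by simpa [pvSqrtGo] using lt_of_lt_of_le hhi h2⟩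
  | succ f ih =>
    intro lo hi hlo hhi hf
    rw [pvSqrtGo]
    have hp1 : 1 ≤ 2 ^ f := Nat.one_le_two_pow
    have hp2 : 2 ^ (f + 1) = 2 * 2 ^ f := by rw [pow_succ]; ring
    split_ifs with h1 h2
    · have h2 : hi * hi ≤ (lo + 1) * (lo + 1) := Nat.mul_le_mul h1 h1
      exact ⟨hlo, lt_of_lt_of_le hhi h2⟩
    · exact ih ((lo + hi) / 2) hi h2 hhi (by omega)
    · exact ih lo ((lo + hi) / 2) hlo (by omega) (by omega)

lemma pvSqrt_spec (m : Nat) :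
    pvSqrt m * pvSqrt m ≤ m ∧ m < (pvSqrt m + 1) * (pvSqrt m + 1) := by
  have h1 : m < (m + 1) * (m + 1) := by nlinarith
  have h2 : m + 1 ≤ 0 + 2 ^ (m + 1) := by
    have := Nat.lt_two_pow_self (n := m + 1)
    omega
  exact pvSqrtGo_spec m (m + 1) 0 (m + 1) (by omega) h1 h2

lemma pvKminN_ge (m : Nat) : m ≤ pvT (pvKminN m) := by
  have hc2 : 2 * m < (pvSqrt (2 * m) + 1) * (pvSqrt (2 * m) + 1) :=
    (pvSqrt_spec (2 * m)).2
  unfold pvKminN pvKminAux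
  generalize hc : pvSqrt (2 * m) = c at hc2 ⊢
  split_ifs with h1 h2
  · rw [pvT_shift]; exact h1
  · exact h2
  · have hT1 : 2 * pvT (c + 1) = (c + 1) * (c + 2) := by rw [two_pvT]
    have hle : (c + 1) * (c + 1) ≤ (c + 1) * (c + 2) := Nat.mul_le_mul_left _ (by omega)
    omega

lemma pvKminN_least (m : Nat) {j : Nat} (hj : j < pvKminN m) : pvT j < m := by
  have hc1 : pvSqrt (2 * m) * pvSqrt (2 * m) ≤ 2 * m :=
    (pvSqrt_spec (2 * m)).1
  unfold pvKminN pvKminAux at hj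
  generalize hc : pvSqrt (2 * m) = c at hc1 hj
  split_ifs at hj with h1 h2
  · -- j < c - 1, so c ≥ 2 and pvT j ≤ pvT (c - 2) < m
    obtain ⟨d, rfl⟩ : ∃ d, c = d + 2 := ⟨c - 2, by omega⟩
    have hT1 : 2 * pvT d = d * (d + 1) := two_pvT d
    have e1 : (d + 2) * (d + 2) = d * d + 4 * d + 4 := by ring
    have e2 : d * (d + 1) = d * d + d := by ring
    have hdj : pvT j ≤ pvT d := pvT_mono (by omega)
    omega
  · -- j < c and (c-1)*c/2 < m
    have hdj : pvT j ≤ pvT (c - 1) := pvT_mono (by omega)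
    rw [pvT_shift] at hdj
    omega
  · -- j < c + 1 and c*(c+1)/2 < m
    have hdj : pvT j ≤ pvT c := pvT_mono (by omega)
    have hTc : pvT c = c * (c + 1) / 2 := rfl
    omega

lemma pvKmin_of_nonpos {xmin : Int} (h : xmin ≤ 0) : pvKmin xmin = 0 := by
  have hm : xmin.toNat = 0 := Int.toNat_of_nonpos h
  unfold pvKmin
  rw [hm]
  decide

lemma pvKmin_ge (xmin : Int) : xmin ≤ (pvT (pvKmin xmin) : Int) := by
  by_cases hx : xmin ≤ 0
  · exact le_trans hx (by positivity)
  · have hx : 0 < xmin := by omega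
    have hm : (xmin.toNat : Int) = xmin := Int.toNat_of_nonneg (le_of_lt hx)
    have := pvKminN_ge xmin.toNat
    unfold pvKmin
    omega

lemma pvKmin_least (xmin : Int) {j : Nat} (hj : j < pvKmin xmin) :
    (pvT j : Int) < xmin := by
  by_cases hx : xmin ≤ 0
  · rw [pvKmin_of_nonpos hx] at hj; omega
  · have hx : 0 < xmin := by omega
    have hm : (xmin.toNat : Int) = xmin := Int.toNat_of_nonneg (le_of_lt hx)
    have := pvKminN_least xmin.toNat (j := j) (by exact hj)
    omega

-- pvT k ≤ 2^31 forces k ≤ 65535 (so A's loop exits within the 70000 fuel on Dom ∧ Pre_)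
lemma pvT_bound {k : Nat} (h : (pvT k : Int) ≤ 2147483648) : k ≤ 65535 := by
  by_contra hk
  have h1 : pvT 65536 ≤ pvT k := pvT_mono (by omega)
  have h2 : pvT 65536 = 2147516416 := by norm_num [pvT]
  omega

-- the sum A's inner for-loop rebuilds equals pvG
lemma pvSum_eq_G (i : Int) (hi : 0 ≤ i) :
    (PySem.List.pyRange 0 i 1).foldl (fun a j => a + j) 0 = pvG i := by
  induction i, hi using Int.le_induction with
  | base =>
    rw [PySem.List.pyRange_one_eq_nil le_rfl]
    simp [pvG_zero]
  | succ n hn ih =>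
    rw [PySem.List.pyRange_one_succ_right hn, List.foldl_append, ih]
    simp only [List.foldl]
    -- pvG (n + 1) = pvG n + n
    unfold pvG
    rw [PySem.Int.floordiv_eq_ediv_of_pos (by norm_num),
        PySem.Int.floordiv_eq_ediv_of_pos (by norm_num)]
    obtain ⟨t, ht⟩ : Even (n * (n - 1)) := by
      have : n * (n - 1) = (n - 1) * ((n - 1) + 1) := by ring
      rw [this]; exact Int.even_mul_succ_self (n - 1)
    obtain ⟨u, hu⟩ : Even ((n + 1) * (n + 1 - 1)) := by
      have : (n + 1) * (n + 1 - 1) = n * (n + 1) := by ring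
      rw [this]
      rcases Int.even_mul_succ_self n with ⟨v, hv⟩
      exact ⟨v, hv⟩
    have hrel : (n + 1) * (n + 1 - 1) = n * (n - 1) + 2 * n := by ring
    omega

-- A's loop, started at state (i, pvG i), exits at the least valid step i0
lemma pvLoopA_eq (xmin xmax i0 : Int) (h0 : 0 ≤ i0)
    (hge : xmin ≤ pvG i0) (hle : pvG i0 ≤ xmax)
    (hlt : ∀ j : Int, 0 ≤ j → j < i0 → pvG j < xmin) :
    ∀ (n : Nat) (i : Int), 0 ≤ i → i ≤ i0 → (i0 - i).toNat < n →
      pvLoopA xmin xmax n i (pvG i) = (pvG i0, i0 - 1) := by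
  intro n
  induction n with
  | zero => intro i _ _ hfuel; omega
  | succ n ih =>
    intro i hi hii0 hfuel
    by_cases heq : i = i0
    · subst heq
      simp only [pvLoopA]
      rw [if_pos ⟨hge, hle⟩]
    · have hilt : i < i0 := by omega
      simp only [pvLoopA]
      rw [if_neg (by
        intro hc
        have := hlt i hi hilt
        omega)]
      rw [pvSum_eq_G (i + 1) (by omega)]
      exact ih (i + 1) (by omega) (by omega) (by omega)

-- B's binary search converges to the least valid step i0
lemma pvSearchB_eq (xmin i0 : Int) (h0 : 0 ≤ i0) (hge : xmin ≤ pvG i0)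
    (hlt : ∀ j : Int, 0 ≤ j → j < i0 → pvG j < xmin) :
    ∀ (n : Nat) (lo hi : Int), (hi - lo).toNat ≤ n → 0 ≤ lo → lo ≤ i0 → i0 ≤ hi →
      pvSearchB xmin lo hi = i0 := by
  intro n
  induction n with
  | zero =>
    intro lo hi hn hlo hloi hihi
    have : lo = i0 := by omega
    rw [pvSearchB, dif_neg (by omega)]
    exact this
  | succ n ih =>
    intro lo hi hn hlo hloi hihi
    rw [pvSearchB]
    by_cases h : lo < hi
    · rw [dif_pos h]
      obtain ⟨hm1, hm2⟩ := pvSearchB_mid lo hi h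
      set mid := PySem.Int.floordiv (lo + hi) 2 with hmid
      by_cases hcond : xmin ≤ pvG mid
      · rw [if_pos hcond]
        have hi0mid : i0 ≤ mid := by
          by_contra hc
          push_neg at hc
          have := hlt mid (by omega) hc
          omega
        exact ih lo mid (by omega) hlo hloi hi0mid
      · rw [if_neg hcond]
        have hmidlt : mid < i0 := by
          by_contra hc
          push_neg at hc
          have := pvG_mono h0 hc
          omega
        exact ih (mid + 1) hi (by omega) (by omega) (by omega) hihi
    · rw [dif_neg h]
      omega

-- the least valid step, as an Int, from pvKmin
lemma pvI0_spec (xmin : Int) :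
    ∃ i0 : Int, 0 ≤ i0 ∧ pvG i0 = (pvT (pvKmin xmin) : Int) ∧ xmin ≤ pvG i0 ∧
      (∀ j : Int, 0 ≤ j → j < i0 → pvG j < xmin) ∧
      i0 ≤ (pvKmin xmin : Int) + 1 := by
  by_cases hk : pvKmin xmin = 0
  · refine ⟨0, le_rfl, ?_, ?_, ?_, by omega⟩
    · rw [hk, pvG_zero]; rfl
    · rw [pvG_zero]
      have := pvKmin_ge xmin
      rw [hk] at this
      have h0 : pvT 0 = 0 := rfl
      omega
    · intro j hj hj0; omega
  · -- kmin ≥ 1, so xmin > 0 (else pvKmin = 0); i0 = kmin + 1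
    have hxpos : 0 < xmin := by
      by_contra hx
      exact hk (pvKmin_of_nonpos (by omega))
    refine ⟨(pvKmin xmin : Int) + 1, by positivity, pvG_cast _, ?_, ?_, le_rfl⟩
    · rw [pvG_cast]; exact pvKmin_ge xmin
    · intro j hj hjlt
      by_cases hj0 : j = 0
      · subst hj0; rw [pvG_zero]; omega
      · obtain ⟨jn, rfl⟩ : ∃ jn : Nat, j = (jn : Int) + 1 := by
          refine ⟨(j - 1).toNat, ?_⟩
          omega
        rw [pvG_cast]
        have hjn : jn < pvKmin xmin := by omega
        exact pvKmin_least xmin hjn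

-- ===== VERDICT (by name: the statement is the Claim_ definition above) =====
theorem calcFirstValidTargetX_spec : Claim_equal_calcFirstValidTargetX := by
  intro coordinates hdom hpre
  obtain ⟨hlen, hpre2⟩ := hpre
  match coordinates, hlen with
  | c0 :: c1 :: rest, _ =>
  simp only [List.headI, List.getD, List.getElem?_cons_succ, List.getElem?_cons_zero,
    Option.getD_some] at hpre2
  unfold Spec_calcFirstValidTargetX calcFirstValidTargetX calcFirstValidTargetX_alt
  have hg0 : PySem.List.pyGet? (c0 :: c1 :: rest) 0 = some c0 :=
    PySem.List.pyGet?_zero_cons c0 (c1 :: rest)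
  have hg1 : PySem.List.pyGet? (c0 :: c1 :: rest) 1 = some c1 := by
    rw [show (1 : Int) = ((1 : Nat) : Int) by norm_num, PySem.List.pyGet?_natCast]
    rfl
  rw [hg0, hg1]
  dsimp only
  obtain ⟨i0, hi0, hG, hge, hlt, hbound⟩ := pvI0_spec c0.1
  -- Dom bound on c1.1, hence on pvKmin, hence on i0
  have hdom1 : pvDomInt c1.1 = true := by
    simp only [Dom_calcFirstValidTargetX, List.all_cons, Bool.and_eq_true] at hdom
    exact hdom.2.1.1
  have hc1 : c1.1 ≤ 2147483648 := by
    simp only [pvDomInt, decide_eq_true_eq] at hdom1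
    exact hdom1.2
  have hkb : pvKmin c0.1 ≤ 65535 := pvT_bound (by omega)
  have hle : pvG i0 ≤ c1.1 := by omega
  have hup : i0 ≤ max c0.1 0 + 1 := by
    by_contra hc
    push_neg at hc
    have hgm : c0.1 ≤ pvG (max c0.1 0 + 1) := by
      by_cases hx : c0.1 ≤ 0
      · have hmx : max c0.1 0 = 0 := by omega
        rw [hmx]
        have h1 : pvG (0 + 1) = 0 := by decide
        omega
      · have hmx : max c0.1 0 = c0.1 := by omega
        rw [hmx]
        unfold pvG
        rw [PySem.Int.le_floordiv_iff_mul_le (by norm_num)]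
        nlinarith
    have := hlt (max c0.1 0 + 1) (by omega) hc
    omega
  have hA := pvLoopA_eq c0.1 c1.1 i0 hi0 hge hle hlt 70000 0 le_rfl hi0 (by omega)
  rw [pvG_zero] at hA
  have hB := pvSearchB_eq c0.1 i0 hi0 hge hlt ((max c0.1 0 + 1).toNat) 0
    (max c0.1 0 + 1) (by omega) le_rfl hi0 hup
  rw [hA, hB]
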